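-- pv_equiv track=rewrite | github.com/Brian910cpr/910cpr-class-landers | scripts/build_indexes.py | bump_folder_lastmod
-- ===== SOURCE A (Python) =====
-- def bump_folder_lastmod(pages):
--     # For any folder URLs like /courses/ or /job/ set lastmod to the newest child page
--     newest_child = {}
--     for url, lm in pages:
--         if url.endswith(".html"):
--             folder = url.rsplit("/", 1)[0] + "/"
--             newest_child[folder] = max(newest_child.get(folder, "0000-00-00"), lm)
--     bumped = []
--     for url, lm in pages:
--         if url.endswith("/"):
--             lm = max(lm, newest_child.get(url, lm))
--         bumped.append((url, lm))
--     return bumped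
-- ===== SOURCE B (Python) =====
-- def bump_folder_lastmod(pages):
--     # Alternative: no prebuilt index; for each folder URL compute its newest child
--     # by scanning all pages inline (naive nested scan, same result).
--     def folder_of(url):
--         return url.rsplit("/", 1)[0] + "/"
--
--     def bumped(url, lm):
--         if not url.endswith("/"):
--             return (url, lm)
--         kids = [clm for curl, clm in pages
--                 if curl.endswith(".html") and folder_of(curl) == url]
--         if not kids:
--             return (url, lm)
--         return (url, max(lm, "0000-00-00", *kids))
--
--     return [bumped(url, lm) for url, lm in pages]
-- ===== Notes on version B (the rewrite author's own statement) =====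
-- stated objective: alternative
-- what changed: Replaced the prebuilt newest_child dict with an inline per-folder scan: each folder URL computes its newest '.html' child by filtering all pages directly, so the index pass disappears.
import Mathlib
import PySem

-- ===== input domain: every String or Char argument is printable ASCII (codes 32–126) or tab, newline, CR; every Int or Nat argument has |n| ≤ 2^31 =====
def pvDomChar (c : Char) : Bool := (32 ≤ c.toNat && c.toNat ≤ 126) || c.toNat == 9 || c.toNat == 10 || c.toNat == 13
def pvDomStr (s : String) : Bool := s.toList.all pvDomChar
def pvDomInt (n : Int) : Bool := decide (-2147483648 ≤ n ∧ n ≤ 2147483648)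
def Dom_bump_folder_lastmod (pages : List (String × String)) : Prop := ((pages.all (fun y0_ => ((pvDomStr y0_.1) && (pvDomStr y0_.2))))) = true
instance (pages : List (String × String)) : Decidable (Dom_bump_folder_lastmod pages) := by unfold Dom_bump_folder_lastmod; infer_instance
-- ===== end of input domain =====

-- B replaces A's prebuilt newest_child dict with an inline per-folder scan of all pages (alternative decomposition, same result).

-- url.rsplit("/", 1)[0] + "/" ported by hand: everything up to the last '/' plus "/",
-- or url + "/" when url contains no '/' (exact: rsplit with maxsplit 1 cuts at the LAST '/').
def pvFolderOf (u : String) : String :=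
  let cs := u.toList
  let r := PySem.Chars.rfind cs ['/']
  if r = -1 then String.ofList (cs ++ ['/']) else String.ofList (cs.take r.toNat ++ ['/'])

-- ===== PORT A =====
def bump_folder_lastmod (pages : List (String × String)) : List (String × String) :=
  let newest_child : PySem.Dict String String :=
    pages.foldl (fun d p =>
      if PySem.Str.endswith p.1 ".html" then
        let folder := pvFolderOf p.1
        d.insert folder (max (d.getD folder "0000-00-00") p.2)
      else d) PySem.Dict.empty
  pages.foldl (fun bumped p =>
    let lm := if PySem.Str.endswith p.1 "/" then max p.2 (newest_child.getD p.1 p.2) else p.2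
    bumped ++ [(p.1, lm)]) []

-- ===== PORT B =====
def bump_folder_lastmod_alt (pages : List (String × String)) : List (String × String) :=
  pages.map (fun p =>
    if PySem.Str.endswith p.1 "/" then
      let kids := (pages.filter (fun q =>
        PySem.Str.endswith q.1 ".html" && (pvFolderOf q.1 == p.1))).map Prod.snd
      if kids.isEmpty then p
      else (p.1, kids.foldl max (max p.2 "0000-00-00"))
    else p)

-- ===== PRECONDITION & SPEC =====
def Spec_bump_folder_lastmod (pages : List (String × String)) (out : List (String × String)) : Prop := out = bump_folder_lastmod_alt pages
instance (pages : List (String × String)) (out : List (String × String)) : Decidable (Spec_bump_folder_lastmod pages out) := by unfold Spec_bump_folder_lastmod; infer_instance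

-- ===== CLAIM (what is proved, stated in full; the proofs are below) =====
def Claim_equal_bump_folder_lastmod : Prop := ∀ (pages : List (String × String)), Dom_bump_folder_lastmod pages → Spec_bump_folder_lastmod pages (bump_folder_lastmod pages)

-- ===== LEMMAS AND PROOFS =====

lemma pv_foldl_optmax (ks : List String) (a : String) :
    ks.foldl (fun o v => some (max (o.getD "0000-00-00") v)) (some a) = some (ks.foldl max a) := by
  induction ks generalizing a with
  | nil => rfl
  | cons k t ih =>
    rw [List.foldl_cons, List.foldl_cons]
    simp only [Option.getD_some]
    exact ih (max a k)

lemma pv_max_foldl_swap (l : List String) (a b : String) :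
    max a (l.foldl max b) = l.foldl max (max a b) := by
  induction l generalizing b with
  | nil => rfl
  | cons c t ih => simp only [List.foldl_cons, ih, max_assoc]

lemma pv_build_get? (pages : List (String × String)) (d : PySem.Dict String String) (f : String) :
    (pages.foldl (fun d p =>
      if PySem.Str.endswith p.1 ".html" then
        let folder := pvFolderOf p.1
        d.insert folder (max (d.getD folder "0000-00-00") p.2)
      else d) d).get? f
    = ((pages.filter (fun q =>
        PySem.Str.endswith q.1 ".html" && (pvFolderOf q.1 == f))).map Prod.snd).foldl
        (fun o v => some (max (o.getD "0000-00-00") v)) (d.get? f) := by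
  induction pages generalizing d with
  | nil => rfl
  | cons q t ih =>
    rw [List.foldl_cons, List.filter_cons]
    by_cases hE : PySem.Str.endswith q.1 ".html" = true
    · rw [if_pos hE]
      by_cases h2 : pvFolderOf q.1 = f
      · have hB : (PySem.Str.endswith q.1 ".html" && (pvFolderOf q.1 == f)) = true := by
          rw [hE, beq_iff_eq.mpr h2]; rfl
        rw [if_pos hB, List.map_cons, List.foldl_cons, ih]
        subst h2
        rw [PySem.Dict.get?_insert_self]
        rfl
      · have hB : (PySem.Str.endswith q.1 ".html" && (pvFolderOf q.1 == f)) = false := by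
          rw [beq_eq_false_iff_ne.mpr h2, Bool.and_false]
        rw [if_neg (Bool.eq_false_iff.mp hB), ih,
          PySem.Dict.get?_insert_of_ne _ _ (fun h => h2 h.symm)]
    · have hE' : PySem.Str.endswith q.1 ".html" = false := Bool.eq_false_iff.mpr hE
      have hB : (PySem.Str.endswith q.1 ".html" && (pvFolderOf q.1 == f)) = false := by
        rw [hE', Bool.false_and]
      rw [if_neg hE, if_neg (Bool.eq_false_iff.mp hB), ih]

-- ===== VERDICT (by name: the statement is the Claim_ definition above) =====
theorem bump_folder_lastmod_spec : Claim_equal_bump_folder_lastmod := by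
  intro pages _
  unfold Spec_bump_folder_lastmod bump_folder_lastmod bump_folder_lastmod_alt
  rw [PySem.List.foldl_append_singleton_eq_map, List.nil_append]
  apply List.map_congr_left
  intro p _
  by_cases hf : PySem.Str.endswith p.1 "/" = true
  · rw [if_pos hf, if_pos hf]
    rw [show (List.foldl (fun (d : PySem.Dict String String) (p : String × String) =>
        if PySem.Str.endswith p.1 ".html" then
          d.insert (pvFolderOf p.1) (max (d.getD (pvFolderOf p.1) "0000-00-00") p.2)
        else d) PySem.Dict.empty pages).getD p.1 p.2
      = ((List.foldl (fun (d : PySem.Dict String String) (p : String × String) =>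
        if PySem.Str.endswith p.1 ".html" then
          d.insert (pvFolderOf p.1) (max (d.getD (pvFolderOf p.1) "0000-00-00") p.2)
        else d) PySem.Dict.empty pages).get? p.1).getD p.2 from rfl]
    rw [pv_build_get?, PySem.Dict.get?_empty]
    rcases hk : (List.filter (fun q =>
        PySem.Str.endswith q.1 ".html" && (pvFolderOf q.1 == p.1)) pages).map Prod.snd
        with _ | ⟨k, ks⟩
    · rw [hk, List.foldl_nil]
      simp only [Option.getD_none, max_self]
      rfl
    · rw [hk, List.foldl_cons]
      simp only [Option.getD_none]
      rw [pv_foldl_optmax, Option.getD_some]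
      show (p.1, max p.2 (List.foldl max (max "0000-00-00" k) ks))
        = if (k :: ks).isEmpty = true then p
          else (p.1, List.foldl max (max p.2 "0000-00-00") (k :: ks))
      rw [if_neg (by simp), List.foldl_cons, pv_max_foldl_swap, max_assoc]
  · rw [if_neg hf, if_neg hf]
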